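-- pv_equiv track=rewrite | github.com/Oseongmin614/Python | Algorithm_python/0411/ant.py | solution
-- ===== SOURCE A (Python) =====
-- def solution(hp):
--     answer = 0
--     ant = 5
--     while hp != 0:
--         answer += hp // ant
--         hp %= ant
--         ant -= 2
--     return answer
-- ===== SOURCE B (Python) =====
-- def solution(hp):
--     r = hp % 5
--     return hp // 5 + r // 3 + r % 3
-- ===== Notes on version B (the rewrite author's own statement) =====
-- stated objective: simpler
-- what changed: Replaces the while loop over decreasing ant sizes with a direct closed-form arithmetic expression hp//5 + (hp%5)//3 + (hp%5)%3.
import Mathlib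
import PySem

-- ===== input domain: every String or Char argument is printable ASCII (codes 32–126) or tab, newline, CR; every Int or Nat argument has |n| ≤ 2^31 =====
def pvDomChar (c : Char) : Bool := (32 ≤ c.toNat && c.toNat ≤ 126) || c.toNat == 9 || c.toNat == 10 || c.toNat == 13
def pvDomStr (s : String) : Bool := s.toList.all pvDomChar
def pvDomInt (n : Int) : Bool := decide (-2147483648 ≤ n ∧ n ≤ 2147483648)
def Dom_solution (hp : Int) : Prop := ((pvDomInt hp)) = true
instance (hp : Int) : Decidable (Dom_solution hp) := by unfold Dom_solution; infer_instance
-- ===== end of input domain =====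

-- B replaces A's while loop with the closed-form hp//5 + (hp%5)//3 + (hp%5)%3 (simpler; no loop).


-- ===== PORT A =====
-- The Python while loop, given fuel for its maximum possible number of iterations (ant
-- shrinks by two each pass and the final ant leaves remainder zero), so the fuel is never
-- exhausted: a totality device only, not an algorithm switch.
def solutionLoop : Nat → Int → Int → Int → Int
  | 0, _, _, answer => answer
  | fuel + 1, hp, ant, answer =>
    if hp ≠ 0 then
      solutionLoop fuel (PySem.Int.mod hp ant) (ant - 2)
        (answer + PySem.Int.floordiv hp ant)
    else answer

def solution (hp : Int) : Int := solutionLoop 3 hp 5 0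

-- ===== PORT B =====
def solution_alt (hp : Int) : Int :=
  let r := PySem.Int.mod hp 5
  PySem.Int.floordiv hp 5 + PySem.Int.floordiv r 3 + PySem.Int.mod r 3

-- ===== PRECONDITION & SPEC =====
def Spec_solution (hp : Int) (out : Int) : Prop := out = solution_alt hp
instance (hp : Int) (out : Int) : Decidable (Spec_solution hp out) := by unfold Spec_solution; infer_instance

-- ===== CLAIM (what is proved, stated in full; the proofs are below) =====
def Claim_equal_solution : Prop := ∀ (hp : Int), Dom_solution hp → Spec_solution hp (solution hp)

-- ===== LEMMAS AND PROOFS =====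

theorem solution_eq_closed (hp : Int) :
    solution hp =
      PySem.Int.floordiv hp 5 + PySem.Int.floordiv (PySem.Int.mod hp 5) 3 +
        PySem.Int.mod (PySem.Int.mod hp 5) 3 := by
  have d : ∀ (a b : Int), 0 < b → PySem.Int.floordiv a b = a / b :=
    fun a b h => PySem.Int.floordiv_eq_ediv_of_pos h
  have m : ∀ (a b : Int), 0 < b → PySem.Int.mod a b = a % b :=
    fun a b h => PySem.Int.mod_eq_emod_of_pos h
  simp only [solution, solutionLoop]
  norm_num [d _ 5 (by norm_num), d _ 3 (by norm_num), d _ 1 (by norm_num),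
            m _ 5 (by norm_num), m _ 3 (by norm_num), m _ 1 (by norm_num)]
  split_ifs <;> omega

-- ===== VERDICT (by name: the statement is the Claim_ definition above) =====
theorem solution_spec : Claim_equal_solution := by
  intro hp _
  unfold Spec_solution solution_alt
  rw [solution_eq_closed]
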